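-- pv_equiv track=rewrite | github.com/rlhadas/medoids | DTLReconGraph.py | find_best_roots
-- ===== SOURCE A (Python) =====
-- def find_best_roots(parasite_tree, min_cost_dict):
--     """
--     :param parasite_tree: parasite tree in the format described at the
--     top of this file
--     :param min_cost_dict: a dictionary - keys representing mappings of
--     parasite vertices onto host vertices (p, h) and values representing
--     the minimum cost for a reconciliation based on that mapping. In DP,
--     this dictionary was called minCost
--     :return: returns a list of all of the mapping nodes involving the
--     parasite root that can produce a MPR
--     """
--     tree_tops = []
--     for key in min_cost_dict:
--         if key[0] == parasite_tree['pTop'][1]: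
--             tree_tops.append(key)
--     tree_min = []
--     min_score = min([min_cost_dict[root] for root in tree_tops])
--     for pair in tree_tops:
--         if min_cost_dict[pair] == min_score:
--             tree_min.append(pair)
--     return tree_min
-- ===== SOURCE B (Python) =====
-- def find_best_roots(parasite_tree, min_cost_dict):
--     target = parasite_tree['pTop'][1]
--     best = None
--     result = []
--     for key, value in min_cost_dict.items():
--         if key[0] == target:
--             if best is None or value < best:
--                 best = value
--                 result = [key]
--             elif value == best:
--                 result.append(key)
--     return result
-- ===== Notes on version B (the rewrite author's own statement) =====
-- stated objective: faster
-- what changed: A makes three passes (collect matching keys, min() over their looked-up costs with a dict lookup per key, then a second filtering pass with another lookup per key); B fuses everything into a single traversal of min_cost_dict that maintains the running minimum and the list of keys achieving it, with no dict lookups at all.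
import Mathlib
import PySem

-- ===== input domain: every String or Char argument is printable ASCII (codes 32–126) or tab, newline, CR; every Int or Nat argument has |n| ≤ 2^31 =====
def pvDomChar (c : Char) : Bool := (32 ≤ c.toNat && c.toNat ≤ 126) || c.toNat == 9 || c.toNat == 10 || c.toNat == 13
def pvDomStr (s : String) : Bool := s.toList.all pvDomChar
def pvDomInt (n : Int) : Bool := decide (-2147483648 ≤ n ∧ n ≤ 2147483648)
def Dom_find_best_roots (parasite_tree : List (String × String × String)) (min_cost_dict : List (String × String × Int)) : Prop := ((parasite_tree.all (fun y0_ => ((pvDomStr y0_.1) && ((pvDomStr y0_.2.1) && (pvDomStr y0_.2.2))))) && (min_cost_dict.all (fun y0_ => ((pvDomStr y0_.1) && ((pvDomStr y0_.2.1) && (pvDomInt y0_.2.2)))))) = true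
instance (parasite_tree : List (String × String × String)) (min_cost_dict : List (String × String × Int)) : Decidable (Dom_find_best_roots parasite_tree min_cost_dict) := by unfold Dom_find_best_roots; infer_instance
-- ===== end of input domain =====

-- B fuses A's three passes (collect matching keys / min over looked-up costs / filter by that min)
-- into one traversal of min_cost_dict keeping the running minimum and its argmin keys (objective: faster, constant-factor).

-- ===== PORT A =====
-- dict lookup in an association list (first match); parasite_tree['pTop'] -> none = KeyError, excluded by Pre_
def pvLookupTree (d : List (String × String × String)) (k : String) : Option (String × String) :=
  match d with
  | [] => none
  | (a, v) :: rest => if a = k then some v else pvLookupTree rest k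

-- min_cost_dict[root]; A only applies it to keys present in the dict, so the [] default is unreachable
def pvLookupCost (d : List (String × String × Int)) (k : String × String) : Int :=
  match d with
  | [] => 0
  | (a, b, v) :: rest => if (a, b) = k then v else pvLookupCost rest k

def find_best_roots (parasite_tree : List (String × String × String)) (min_cost_dict : List (String × String × Int)) : List (String × String) :=
  match pvLookupTree parasite_tree "pTop" with
  | none => []  -- KeyError in Python; excluded by Pre_
  | some top =>
    let tree_tops := min_cost_dict.foldl
      (fun acc e => if e.1 = top.2 then acc ++ [(e.1, e.2.1)] else acc) []
    let scores := tree_tops.map (fun root => pvLookupCost min_cost_dict root)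
    match PySem.List.min? scores (fun x => x) with
    | none => []  -- min([]) raises ValueError in Python; excluded by Pre_
    | some min_score =>
      tree_tops.foldl
        (fun acc pair => if pvLookupCost min_cost_dict pair = min_score then acc ++ [pair] else acc) []

-- ===== PORT B =====
def find_best_roots_alt (parasite_tree : List (String × String × String)) (min_cost_dict : List (String × String × Int)) : List (String × String) :=
  match pvLookupTree parasite_tree "pTop" with
  | none => []  -- KeyError in Python; excluded by Pre_
  | some top =>
    (min_cost_dict.foldl
      (fun (st : Option Int × List (String × String)) e =>
        if e.1 = top.2 then
          match st.1 with
          | none => (some e.2.2, [(e.1, e.2.1)])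
          | some best =>
            if e.2.2 < best then (some e.2.2, [(e.1, e.2.1)])
            else if e.2.2 = best then (st.1, st.2 ++ [(e.1, e.2.1)])
            else st
        else st)
      (none, [])).2

-- ===== PRECONDITION & SPEC =====
-- Pre_ requires: (a) both association lists have pairwise-distinct keys (lists with duplicate
-- keys do not represent Python dicts — dict construction collapses them); (b) 'pTop' is a key of
-- parasite_tree (otherwise A raises KeyError); (c) at least one key of min_cost_dict starts with
-- the pTop value (otherwise A raises ValueError on min([])).
def Pre_find_best_roots (parasite_tree : List (String × String × String)) (min_cost_dict : List (String × String × Int)) : Prop :=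
  (parasite_tree.map (fun e => e.1)).Nodup ∧
  (min_cost_dict.map (fun e => (e.1, e.2.1))).Nodup ∧
  ∃ v ∈ parasite_tree, v.1 = "pTop" ∧ ∃ e ∈ min_cost_dict, e.1 = v.2.2
instance (parasite_tree : List (String × String × String)) (min_cost_dict : List (String × String × Int)) : Decidable (Pre_find_best_roots parasite_tree min_cost_dict) := by unfold Pre_find_best_roots; infer_instance

def pvWitness_find_best_roots : (List (String × String × String)) × (List (String × String × Int)) :=
  ([("pTop", "a", "b")], [("b", "h", 1), ("c", "h", 0)])

def Spec_find_best_roots (parasite_tree : List (String × String × String)) (min_cost_dict : List (String × String × Int)) (out : List (String × String)) : Prop := out = find_best_roots_alt parasite_tree min_cost_dict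
instance (parasite_tree : List (String × String × String)) (min_cost_dict : List (String × String × Int)) (out : List (String × String)) : Decidable (Spec_find_best_roots parasite_tree min_cost_dict out) := by unfold Spec_find_best_roots; infer_instance

-- ===== CLAIM (what is proved, stated in full; the proofs are below) =====
def Claim_equal_find_best_roots : Prop := ∀ (parasite_tree : List (String × String × String)) (min_cost_dict : List (String × String × Int)), Dom_find_best_roots parasite_tree min_cost_dict → Pre_find_best_roots parasite_tree min_cost_dict → Spec_find_best_roots parasite_tree min_cost_dict (find_best_roots parasite_tree min_cost_dict)

-- ===== LEMMAS AND PROOFS =====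

-- lookup of a present key in a dup-free association list returns that entry's value
theorem pvLookupCost_self (d : List (String × String × Int))
    (hnd : (d.map (fun e => (e.1, e.2.1))).Nodup)
    (e : String × String × Int) (he : e ∈ d) :
    pvLookupCost d (e.1, e.2.1) = e.2.2 := by
  induction d with
  | nil => cases he
  | cons a rest ih =>
    obtain ⟨a1, a2, av⟩ := a
    simp only [List.map_cons, List.nodup_cons] at hnd
    rcases List.mem_cons.mp he with he | he
    · subst he; simp [pvLookupCost]
    · simp only [pvLookupCost]
      split
      · rename_i hk
        exact absurd (by rw [hk]; exact List.mem_map.mpr ⟨e, he, rfl⟩) hnd.1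
      · exact ih hnd.2 he

-- min? of a right-extended list, split by whether the old list was empty
theorem pvMin?_append_none (xs : List Int) (v : Int)
    (h : PySem.List.min? xs (fun x => x) = none) :
    PySem.List.min? (xs ++ [v]) (fun x => x) = some v := by
  have hx : xs = [] := (PySem.List.min?_eq_none_iff xs _).mp h
  subst hx
  simp [PySem.List.min?]

theorem pvMin?_append_some (xs : List Int) (v m : Int)
    (h : PySem.List.min? xs (fun x => x) = some m) :
    PySem.List.min? (xs ++ [v]) (fun x => x) = if v < m then some v else some m := by
  simp only [PySem.List.min?] at h ⊢
  rw [List.foldl_append, List.foldl_cons, List.foldl_nil, h]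

-- B's fused loop over the matching entries computes (min of values, argmin keys in order)
theorem pvFusedCore (M : List (String × String × Int)) :
    M.foldl
      (fun (st : Option Int × List (String × String)) e =>
        match st.1 with
        | none => (some e.2.2, [(e.1, e.2.1)])
        | some best =>
          if e.2.2 < best then (some e.2.2, [(e.1, e.2.1)])
          else if e.2.2 = best then (st.1, st.2 ++ [(e.1, e.2.1)])
          else st)
      (none, []) =
    (match PySem.List.min? (M.map (fun e => e.2.2)) (fun x => x) with
     | none => (none, [])
     | some m => (some m, (M.filter (fun e => decide (e.2.2 = m))).map (fun e => (e.1, e.2.1)))) := by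
  induction M using List.reverseRecOn with
  | nil => simp [PySem.List.min?]
  | append_singleton M x ih =>
    rw [List.foldl_append, ih]
    simp only [List.map_append, List.map_cons, List.map_nil]
    rcases hmin : PySem.List.min? (M.map (fun e => e.2.2)) (fun x => x) with _ | m
    · -- M = [], first matching entry starts the state
      have hM : M = [] := by
        have := (PySem.List.min?_eq_none_iff (M.map (fun e => e.2.2)) (fun x => x)).mp hmin
        simpa using this
      subst hM
      rw [pvMin?_append_none _ _ hmin]
      simp [PySem.List.min?]
    · rw [pvMin?_append_some _ _ _ hmin]
      have hmem : ∀ y ∈ M.map (fun e => e.2.2), m ≤ y :=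
        PySem.List.min?_isMin hmin
      by_cases hlt : x.2.2 < m
      · -- strictly smaller: state resets to the new entry; no old entry attains the new min
        have hnone : M.filter (fun e => decide (e.2.2 = x.2.2)) = [] := by
          apply List.filter_eq_nil_iff.mpr
          intro e heM
          have := hmem e.2.2 (List.mem_map.mpr ⟨e, heM, rfl⟩)
          simp only [decide_eq_true_eq]
          omega
        simp [hmin, hlt, List.filter_append, hnone]
      · by_cases heq : x.2.2 = m
        · -- ties are appended
          subst heq
          simp [hmin, List.filter_append]
        · -- strictly larger: state unchanged, entry filtered out
          simp [hmin, hlt, List.filter_append, heq]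

-- A = B for a fixed target (the 'pTop' branch), given dup-free keys
theorem pvBranchEq (min_cost_dict : List (String × String × Int)) (target : String)
    (hnd : (min_cost_dict.map (fun e => (e.1, e.2.1))).Nodup) :
    (let tree_tops := min_cost_dict.foldl
        (fun acc e => if e.1 = target then acc ++ [(e.1, e.2.1)] else acc) []
     let scores := tree_tops.map (fun root => pvLookupCost min_cost_dict root)
     match PySem.List.min? scores (fun x => x) with
     | none => ([] : List (String × String))
     | some min_score =>
       tree_tops.foldl
         (fun acc pair => if pvLookupCost min_cost_dict pair = min_score then acc ++ [pair] else acc) []) =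
    (min_cost_dict.foldl
      (fun (st : Option Int × List (String × String)) e =>
        if e.1 = target then
          match st.1 with
          | none => (some e.2.2, [(e.1, e.2.1)])
          | some best =>
            if e.2.2 < best then (some e.2.2, [(e.1, e.2.1)])
            else if e.2.2 = best then (st.1, st.2 ++ [(e.1, e.2.1)])
            else st
        else st)
      (none, [])).2 := by
  -- both sides reduce to statements about the matching sublist M
  rw [PySem.List.foldl_ite_eq_foldl_filter (fun e : String × String × Int => e.1 = target)
        (fun (st : Option Int × List (String × String)) e =>
          match st.1 with
          | none => (some e.2.2, [(e.1, e.2.1)])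
          | some best =>
            if e.2.2 < best then (some e.2.2, [(e.1, e.2.1)])
            else if e.2.2 = best then (st.1, st.2 ++ [(e.1, e.2.1)])
            else st)
        min_cost_dict (none, []), pvFusedCore]
  rw [PySem.List.foldl_append_ite (fun e : String × String × Int => e.1 = target) (fun e : String × String × Int => (e.1, e.2.1)) min_cost_dict []]
  simp only [List.nil_append]
  set M := min_cost_dict.filter (fun e => decide (e.1 = target)) with hMdef
  have hsub : ∀ e ∈ M, e ∈ min_cost_dict := fun e he => List.mem_of_mem_filter he
  -- scores over looked-up costs = the entries' own values
  have hscores : (M.map (fun e => (e.1, e.2.1))).map (fun root => pvLookupCost min_cost_dict root)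
      = M.map (fun e => e.2.2) := by
    rw [List.map_map]
    exact List.map_congr_left (fun e he => pvLookupCost_self min_cost_dict hnd e (hsub e he))
  rw [hscores]
  rcases hmin : PySem.List.min? (M.map (fun e => e.2.2)) (fun x => x) with _ | m
  · simp only [hmin]
  · simp only [hmin]
    rw [PySem.List.foldl_append_ite_eq_filter (fun pair : String × String => pvLookupCost min_cost_dict pair = m)]
    simp only [List.nil_append, List.filter_map]
    congr 1
    apply List.filter_congr
    intro e he
    simp only [Function.comp]
    rw [pvLookupCost_self min_cost_dict hnd e (hsub e he)]

-- ===== VERDICT (by name: the statement is the Claim_ definition above) =====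
theorem find_best_roots_spec : Claim_equal_find_best_roots := by
  intro pt mcd _ hpre
  obtain ⟨hnd1, hnd2, hex⟩ := hpre
  unfold Spec_find_best_roots find_best_roots find_best_roots_alt
  rcases h : pvLookupTree pt "pTop" with _ | top
  · rfl
  · exact pvBranchEq mcd top.2 hnd2
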